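-- pv_equiv track=rewrite | github.com/Ncastro878/SolvedProgrammingProblems | Coding Bat/CodingBat - make_chocolate_exercise.py | make_chocolate
-- ===== SOURCE A (Python) =====
-- def make_chocolate(small, big, goal):
--   '''
--     code from successful CodingBat exercise called Make Chocolate. First successful one
--     Python
--   '''
--
--   Able = False
--   num_big = 0
--   num_small = 0
--
--   #Test if even capABLE of making goal,
--   #if yes, set Able var to True & make note of how many
--   #big bars needed via num_big variable
--   for i in range(big+1):
--     if goal >= ((i*5)) and goal <= ((i*5)+small):
--       Able = True
--       num_big = i
--
--   #if not able to make goal, then quit and return -1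
--   if Able == False:
--     return -1
--
--   '''Now we test range of our needed big bars amount by adding all
--     the small bars 1 by 1 until we hit out Goal.
--     Once goal is hit, we make note of how many small
--     bars needed via the num_small variable then break
--     out of the loop
--   '''
--   for i in range(small + 1):
--     if i + (num_big*5) == goal:
--       num_small = i
--       break
--
--   #return the num_small var noted from before
--   return num_small
-- ===== SOURCE B (Python) =====
-- def make_chocolate(small, big, goal):
--     num_big = min(goal // 5, big)
--     if num_big < 0:
--         return -1
--     rem = goal - 5 * num_big
--     return rem if rem <= small else -1
-- ===== Notes on version B (the rewrite author's own statement) =====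
-- stated objective: faster
-- what changed: replaced A's two linear scans (over range(big+1) and range(small+1)) with the closed form num_big = min(goal//5, big) and a remainder check against small
import Mathlib
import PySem

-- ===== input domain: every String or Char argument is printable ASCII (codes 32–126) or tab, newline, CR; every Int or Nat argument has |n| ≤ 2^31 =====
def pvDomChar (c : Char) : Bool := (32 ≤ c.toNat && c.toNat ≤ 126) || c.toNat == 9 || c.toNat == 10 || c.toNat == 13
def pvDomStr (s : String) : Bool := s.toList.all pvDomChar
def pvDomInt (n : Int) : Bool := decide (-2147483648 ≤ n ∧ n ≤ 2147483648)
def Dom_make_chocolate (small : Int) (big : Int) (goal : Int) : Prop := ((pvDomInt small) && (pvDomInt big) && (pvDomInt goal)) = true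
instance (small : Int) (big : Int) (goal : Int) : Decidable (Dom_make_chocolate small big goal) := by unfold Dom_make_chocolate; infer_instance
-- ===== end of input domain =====

-- B replaces A's two linear scans with the closed form num_big = min(goal//5, big) plus a remainder check (faster, asymptotic).


-- ===== PORT A =====
-- second loop of A: 'for i in range(small+1): if i + num_big*5 == goal: num_small = i; break' then 'return num_small'
def mcLoop2 (num_big : Int) (goal : Int) : List Int → Int
  | [] => 0
  | i :: rest => if i + num_big * 5 = goal then i else mcLoop2 num_big goal rest

def make_chocolate (small : Int) (big : Int) (goal : Int) : Int :=
  -- first loop over range(big+1) carrying (Able, num_big)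
  let st := (PySem.List.pyRange 0 (big + 1) 1).foldl
    (fun (s : Bool × Int) i =>
      if goal ≥ i * 5 ∧ goal ≤ i * 5 + small then (true, i) else s)
    (false, 0)
  if st.1 = false then -1
  else mcLoop2 st.2 goal (PySem.List.pyRange 0 (small + 1) 1)

-- ===== PORT B =====
def make_chocolate_alt (small : Int) (big : Int) (goal : Int) : Int :=
  let num_big := min (PySem.Int.floordiv goal 5) big
  if num_big < 0 then -1
  else
    let rem := goal - 5 * num_big
    if rem ≤ small then rem else -1

-- ===== PRECONDITION & SPEC =====
def Spec_make_chocolate (small : Int) (big : Int) (goal : Int) (out : Int) : Prop := out = make_chocolate_alt small big goal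
instance (small : Int) (big : Int) (goal : Int) (out : Int) : Decidable (Spec_make_chocolate small big goal out) := by unfold Spec_make_chocolate; infer_instance

-- ===== CLAIM (what is proved, stated in full; the proofs are below) =====
def Claim_equal_make_chocolate : Prop := ∀ (small : Int) (big : Int) (goal : Int), Dom_make_chocolate small big goal → Spec_make_chocolate small big goal (make_chocolate small big goal)

-- ===== LEMMAS AND PROOFS =====

-- Characterisation of A's first loop over range(0, n) for a Nat bound n:
-- with q = goal // 5, the state is (true, min q (n-1)) when that candidate is valid, else (false, 0).
theorem mc_fold_char (small goal : Int) (n : Nat) :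
    ((PySem.List.pyRange 0 (n : Int) 1).foldl
      (fun (s : Bool × Int) i =>
        if goal ≥ i * 5 ∧ goal ≤ i * 5 + small then (true, i) else s)
      (false, 0))
    = (if 0 ≤ min (PySem.Int.floordiv goal 5) ((n : Int) - 1) ∧
          goal - 5 * min (PySem.Int.floordiv goal 5) ((n : Int) - 1) ≤ small
       then (true, min (PySem.Int.floordiv goal 5) ((n : Int) - 1))
       else (false, 0)) := by
  have hq1 : 5 * PySem.Int.floordiv goal 5 ≤ goal := by
    rw [PySem.Int.floordiv_eq_ediv_of_pos (by norm_num)]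
    have := Int.mul_ediv_add_emod goal 5
    have := Int.emod_nonneg goal (by norm_num : (5:Int) ≠ 0)
    omega
  have hq2 : goal < 5 * PySem.Int.floordiv goal 5 + 5 := by
    rw [PySem.Int.floordiv_eq_ediv_of_pos (by norm_num)]
    have := Int.mul_ediv_add_emod goal 5
    have := Int.emod_lt_of_pos goal (by norm_num : (0:Int) < 5)
    omega
  induction n with
  | zero =>
    rw [PySem.List.pyRange_one_eq_nil (by norm_num)]
    simp only [List.foldl_nil]
    rw [if_neg]
    omega
  | succ n ih =>
    have hcast : ((n + 1 : Nat) : Int) = (n : Int) + 1 := by push_cast; ring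
    rw [hcast, PySem.List.pyRange_one_succ_right (by positivity), List.foldl_append,
      List.foldl_cons, List.foldl_nil, ih]
    by_cases hP : goal ≥ (n : Int) * 5 ∧ goal ≤ (n : Int) * 5 + small
    · -- last index n is valid: it becomes the new num_big, and min q n = n
      have hqn : (n : Int) ≤ PySem.Int.floordiv goal 5 := by nlinarith [hP.1]
      have hmin1 : min (PySem.Int.floordiv goal 5) ((n : Int) + 1 - 1) = (n : Int) := by omega
      simp only [if_pos hP, hmin1]
      rw [if_pos (by omega)]
    · simp only [if_neg hP]
      rcases (by omega : goal < (n : Int) * 5 ∨ ((n : Int) * 5 ≤ goal ∧ (n : Int) * 5 + small < goal)) with hlt | ⟨hge, hsm⟩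
      · -- goal < 5n: q < n, so min q n = min q (n-1)
        have hqn : PySem.Int.floordiv goal 5 < (n : Int) := by nlinarith
        have hmin1 : min (PySem.Int.floordiv goal 5) ((n : Int) + 1 - 1)
            = min (PySem.Int.floordiv goal 5) ((n : Int) - 1) := by omega
        rw [hmin1]
      · -- remainder at n exceeds small: both sides are (false, 0)
        have hqn : (n : Int) ≤ PySem.Int.floordiv goal 5 := by nlinarith
        rw [if_neg (by omega), if_neg (by omega)]

-- A's second loop returns r = goal - num_big*5 as soon as the list contains r.
theorem mcLoop2_eq (num_big goal : Int) (L : List Int) (h : goal - num_big * 5 ∈ L) :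
    mcLoop2 num_big goal L = goal - num_big * 5 := by
  induction L with
  | nil => cases h
  | cons i rest ih =>
    by_cases hi : i + num_big * 5 = goal
    · simp [mcLoop2, hi]; omega
    · have : goal - num_big * 5 ∈ rest := by
        rcases List.mem_cons.mp h with h | h
        · exact absurd (by omega) hi
        · exact h
      simp [mcLoop2, hi, ih this]

-- ===== VERDICT (by name: the statement is the Claim_ definition above) =====
theorem make_chocolate_spec : Claim_equal_make_chocolate := by
  intro small big goal _
  unfold Spec_make_chocolate make_chocolate make_chocolate_alt
  by_cases hbig : 0 ≤ big + 1
  · have hn : ((big + 1).toNat : Int) = big + 1 := Int.toNat_of_nonneg hbig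
    have hch := mc_fold_char small goal (big + 1).toNat
    rw [hn, show big + 1 - 1 = big by ring] at hch
    simp only [hch]
    have hq1 : 5 * PySem.Int.floordiv goal 5 ≤ goal := by
      rw [PySem.Int.floordiv_eq_ediv_of_pos (by norm_num)]
      have := Int.mul_ediv_add_emod goal 5
      have := Int.emod_nonneg goal (by norm_num : (5:Int) ≠ 0)
      omega
    by_cases hc : 0 ≤ min (PySem.Int.floordiv goal 5) big ∧
        goal - 5 * min (PySem.Int.floordiv goal 5) big ≤ small
    · rw [if_pos hc]
      simp only [Bool.true_eq_false, if_false]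
      rw [if_neg (by omega : ¬ min (PySem.Int.floordiv goal 5) big < 0), if_pos hc.2]
      have hr : goal - min (PySem.Int.floordiv goal 5) big * 5
          ∈ PySem.List.pyRange 0 (small + 1) 1 := by
        rw [PySem.List.mem_pyRange_one]
        have := min_le_left (PySem.Int.floordiv goal 5) big
        omega
      rw [mcLoop2_eq _ _ _ hr]; ring
    · rw [if_neg hc]
      split
      · by_cases hneg : min (PySem.Int.floordiv goal 5) big < 0
        · rw [if_pos hneg]
        · rw [if_neg hneg, if_neg (by omega)]
      · simp_all
  · -- big + 1 ≤ 0: A's range is empty so A returns -1; min q big ≤ big < 0 so B returns -1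
    rw [PySem.List.pyRange_one_eq_nil (by omega)]
    simp only [List.foldl_nil]
    split
    · rw [if_pos (by omega : min (PySem.Int.floordiv goal 5) big < 0)]
    · simp_all
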